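-- pv_equiv track=rewrite | github.com/akevinbailey/FindMuleSoftPersistence | FindMuleSoftPersistence.py | strip_xml_comments
-- ===== SOURCE A (Python) =====
-- from typing import List, Optional, Tuple
--
-- def strip_xml_comments(line: str, in_comment: bool) -> Tuple[str, bool]:
--     """
--     Remove XML comments from a single line while tracking multi-line <!-- --> comment blocks.
--     Returns (cleaned_line, new_in_comment).
--     """
--     out: List[str] = []
--     i = 0
--     n = len(line)
--
--     while i < n:
--         if in_comment:
--             end = line.find("-->", i)
--             if end == -1:
--                 return "".join(out), True
--             i = end + 3
--             in_comment = False
--             continue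
--
--         start = line.find("<!--", i)
--         if start == -1:
--             out.append(line[i:])
--             break
--
--         out.append(line[i:start])
--         i = start + 4
--         in_comment = True
--
--     return "".join(out), in_comment
-- ===== SOURCE B (Python) =====
-- from typing import Tuple
--
-- def strip_xml_comments(line: str, in_comment: bool) -> Tuple[str, bool]:
--     """
--     Remove XML comments from a single line while tracking multi-line <!-- --> comment blocks.
--     Returns (cleaned_line, new_in_comment).
--     """
--     pieces = []
--     if in_comment:
--         _, sep, line = line.partition("-->")
--         if not sep:
--             return "", True
--     while True:
--         before, sep, line = line.partition("<!--")
--         pieces.append(before)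
--         if not sep:
--             return "".join(pieces), False
--         _, sep2, line = line.partition("-->")
--         if not sep2:
--             return "".join(pieces), True
-- ===== Notes on version B (the rewrite author's own statement) =====
-- stated objective: idiomatic
-- what changed: Replaced the index-driven while loop with a flag juggled across iterations and find(sub, i) offsets by an idiomatic str.partition consumer: the incoming in_comment state is discharged once up front, then each loop iteration partitions off one complete <!--...--> comment, so there is no index arithmetic and no in_comment mutation inside the loop.
import Mathlib
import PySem

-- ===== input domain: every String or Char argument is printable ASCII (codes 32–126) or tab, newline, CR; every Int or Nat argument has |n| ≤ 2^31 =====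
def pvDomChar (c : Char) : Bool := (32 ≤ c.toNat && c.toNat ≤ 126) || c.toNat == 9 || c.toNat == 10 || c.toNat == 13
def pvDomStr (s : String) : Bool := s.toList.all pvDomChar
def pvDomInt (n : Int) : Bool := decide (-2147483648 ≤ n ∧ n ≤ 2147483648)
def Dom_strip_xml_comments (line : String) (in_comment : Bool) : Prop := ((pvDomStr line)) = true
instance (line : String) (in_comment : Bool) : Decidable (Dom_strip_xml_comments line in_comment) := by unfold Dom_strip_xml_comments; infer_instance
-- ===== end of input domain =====

-- B replaces A's index-driven loop (find(sub, i) offsets + an in_comment flag mutated inside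
-- the loop) by an idiomatic str.partition consumer; same values everywhere, no speed claim.

def pvOpen : List Char := ['<', '!', '-', '-']    -- "<!--"
def pvClose : List Char := ['-', '-', '>']        -- "-->"

-- ===== PORT A =====
-- A's while loop: state i (scan index), in_comment, out (list of kept pieces).
def pvAuxA (s : List Char) (i : Nat) (ic : Bool) (out : List (List Char)) : List Char × Bool :=
  if hlt : i < s.length then
    if ic then
      if hE : PySem.Chars.findFrom s pvClose (i : Int) none = -1 then
        (out.flatten, true)                                        -- return "".join(out), True
      else
        pvAuxA s ((PySem.Chars.findFrom s pvClose (i : Int) none).toNat + 3) false out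
    else
      if hS : PySem.Chars.findFrom s pvOpen (i : Int) none = -1 then
        ((out ++ [PySem.List.slice s (some (i : Int)) none]).flatten, ic)   -- out.append(line[i:]); break
      else
        pvAuxA s ((PySem.Chars.findFrom s pvOpen (i : Int) none).toNat + 4) true
          (out ++ [PySem.List.slice s (some (i : Int)) (some (PySem.Chars.findFrom s pvOpen (i : Int) none))])
  else (out.flatten, ic)
termination_by s.length - i
decreasing_by
  · have h := PySem.Chars.findFrom_natCast_spec s pvClose i (by omega) hE
    have h1 := h.1
    omega
  · have h := PySem.Chars.findFrom_natCast_spec s pvOpen i (by omega) hS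
    have h1 := h.1
    omega

def strip_xml_comments (line : String) (in_comment : Bool) : String × Bool :=
  (String.ofList (pvAuxA line.toList 0 in_comment []).1, (pvAuxA line.toList 0 in_comment []).2)

-- ===== PORT B =====
-- port of Python's  s.partition(sub)  (the middle component is 'was the separator found').
def pvPartition (s sub : List Char) : List Char × Bool × List Char :=
  if PySem.Chars.find s sub = -1 then (s, false, [])
  else (s.take (PySem.Chars.find s sub).toNat, true, s.drop ((PySem.Chars.find s sub).toNat + sub.length))

-- characterisations of pvPartition (the port of the two calls cites them)
lemma pvPartition_not_found {s sub : List Char} (h : PySem.Chars.find s sub = -1) :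
    pvPartition s sub = (s, false, []) := by simp [pvPartition, h]

lemma pvPartition_found {s sub : List Char} (h : PySem.Chars.find s sub ≠ -1) :
    pvPartition s sub =
      (s.take (PySem.Chars.find s sub).toNat, true,
       s.drop ((PySem.Chars.find s sub).toNat + sub.length)) := by simp [pvPartition, h]

-- termination helper for pvLoopB (cited by decreasing_by)
lemma pvPartition_true_len {s sub b r : List Char} (hsub : sub ≠ [])
    (h : pvPartition s sub = (b, true, r)) : r.length + sub.length ≤ s.length := by
  by_cases hf : PySem.Chars.find s sub = -1
  · rw [pvPartition_not_found hf] at h; simp at h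
  · rw [pvPartition_found hf] at h
    have hin : sub <:+: s := (PySem.Chars.find_ne_neg_one_iff s sub).mp hf
    have hlen := hin.length_le
    have hpos : 0 < sub.length := List.length_pos_iff.mpr hsub
    have hr : r = s.drop ((PySem.Chars.find s sub).toNat + sub.length) := by
      have := congrArg (fun t => t.2.2) h
      simpa using this.symm
    subst hr
    simp only [List.length_drop]
    omega

-- Source B's while loop: partition off one complete comment per iteration.
def pvLoopB (s : List Char) (pieces : List (List Char)) : List Char × Bool :=
  match h1 : pvPartition s pvOpen with
  | (before, sep, rest) =>
    if sep = false then ((pieces ++ [before]).flatten, false)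
    else
      match h2 : pvPartition rest pvClose with
      | (_, sep2, rest2) =>
        if sep2 = false then ((pieces ++ [before]).flatten, true)
        else pvLoopB rest2 (pieces ++ [before])
termination_by s.length
decreasing_by
  have hfo : PySem.Chars.find s pvOpen ≠ -1 := by
    intro hf
    rw [pvPartition_not_found hf] at h1
    simp_all
  have h1' := pvPartition_found hfo
  rw [h1] at h1'
  have hrest : rest = s.drop ((PySem.Chars.find s pvOpen).toNat + pvOpen.length) := by
    have := congrArg (fun t => t.2.2) h1'
    simpa using this
  have hfc : PySem.Chars.find rest pvClose ≠ -1 := by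
    intro hf
    rw [pvPartition_not_found hf] at h2
    simp_all
  have h2' := pvPartition_found hfc
  rw [h2] at h2'
  have hrest2 : rest2 = rest.drop ((PySem.Chars.find rest pvClose).toNat + pvClose.length) := by
    have := congrArg (fun t => t.2.2) h2'
    simpa using this
  have l1 := pvPartition_true_len (sub := pvOpen) (by decide) (pvPartition_found hfo)
  have l2 := pvPartition_true_len (sub := pvClose) (by decide) (pvPartition_found hfc)
  rw [← hrest] at l1
  rw [hrest2]
  simp only [pvOpen, pvClose, List.length_drop, List.length_cons, List.length_nil] at l1 l2 ⊢
  omega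

def pvStripB (s : List Char) (ic : Bool) : List Char × Bool :=
  if ic then
    match pvPartition s pvClose with
    | (_, sep, rest) => if sep = false then ([], true) else pvLoopB rest []
  else pvLoopB s []

def strip_xml_comments_alt (line : String) (in_comment : Bool) : String × Bool :=
  (String.ofList (pvStripB line.toList in_comment).1, (pvStripB line.toList in_comment).2)

-- ===== PRECONDITION & SPEC =====
def Spec_strip_xml_comments (line : String) (in_comment : Bool) (out : String × Bool) : Prop := out = strip_xml_comments_alt line in_comment
instance (line : String) (in_comment : Bool) (out : String × Bool) : Decidable (Spec_strip_xml_comments line in_comment out) := by unfold Spec_strip_xml_comments; infer_instance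

-- ===== CLAIM (what is proved, stated in full; the proofs are below) =====
def Claim_equal_strip_xml_comments : Prop := ∀ (line : String) (in_comment : Bool), Dom_strip_xml_comments line in_comment → Spec_strip_xml_comments line in_comment (strip_xml_comments line in_comment)

-- ===== LEMMAS AND PROOFS =====

-- position facts about a successful find
lemma pvFind_bound {t sub : List Char} (h : PySem.Chars.find t sub ≠ -1) :
    0 ≤ PySem.Chars.find t sub ∧ (PySem.Chars.find t sub).toNat + sub.length ≤ t.length := by
  have hin := (PySem.Chars.find_ne_neg_one_iff t sub).mp h
  have h0 : 0 ≤ PySem.Chars.find t sub := (PySem.Chars.find_nonneg_iff t sub).mpr hin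
  have hsp := (PySem.Chars.find_spec (s := t) (sub := sub) h0).1
  have hl := hsp.length_le
  simp only [List.length_drop] at hl
  have hle := PySem.Chars.find_le_length t sub
  exact ⟨h0, by omega⟩

-- the three unfolding equations of pvLoopB
lemma pvLoopB_eq_nf {s : List Char} (hfo : PySem.Chars.find s pvOpen = -1) (pieces : List (List Char)) :
    pvLoopB s pieces = ((pieces ++ [s]).flatten, false) := by
  rw [pvLoopB.eq_def, pvPartition_not_found hfo]
  simp

lemma pvLoopB_eq_noclose {s : List Char} (hfo : PySem.Chars.find s pvOpen ≠ -1)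
    (hfc : PySem.Chars.find (s.drop ((PySem.Chars.find s pvOpen).toNat + 4)) pvClose = -1)
    (pieces : List (List Char)) :
    pvLoopB s pieces = ((pieces ++ [s.take (PySem.Chars.find s pvOpen).toNat]).flatten, true) := by
  rw [pvLoopB.eq_def, pvPartition_found hfo]
  have h4 : pvOpen.length = 4 := by decide
  rw [h4]
  simp [pvPartition_not_found hfc]

lemma pvLoopB_eq_step {s : List Char} (hfo : PySem.Chars.find s pvOpen ≠ -1)
    (hfc : PySem.Chars.find (s.drop ((PySem.Chars.find s pvOpen).toNat + 4)) pvClose ≠ -1)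
    (pieces : List (List Char)) :
    pvLoopB s pieces =
      pvLoopB ((s.drop ((PySem.Chars.find s pvOpen).toNat + 4)).drop
                 ((PySem.Chars.find (s.drop ((PySem.Chars.find s pvOpen).toNat + 4)) pvClose).toNat + 3))
        (pieces ++ [s.take (PySem.Chars.find s pvOpen).toNat]) := by
  rw [pvLoopB.eq_def, pvPartition_found hfo]
  have h4 : pvOpen.length = 4 := by decide
  rw [h4]
  simp only []
  rw [pvPartition_found hfc]
  have h3 : pvClose.length = 3 := by decide
  rw [h3]
  simp

-- in the step case the remaining suffix is strictly shorter
lemma pvStep_len {s : List Char} (hfo : PySem.Chars.find s pvOpen ≠ -1)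
    (hfc : PySem.Chars.find (s.drop ((PySem.Chars.find s pvOpen).toNat + 4)) pvClose ≠ -1) :
    ((s.drop ((PySem.Chars.find s pvOpen).toNat + 4)).drop
       ((PySem.Chars.find (s.drop ((PySem.Chars.find s pvOpen).toNat + 4)) pvClose).toNat + 3)).length < s.length := by
  have b1 := pvFind_bound hfo
  have b2 := pvFind_bound hfc
  simp only [pvOpen, pvClose, List.length_cons, List.length_nil, List.length_drop] at b1 b2 ⊢
  omega

-- the accumulator of pvLoopB only prefixes the result
lemma pvLoopB_acc : ∀ (n : Nat) (s : List Char), s.length ≤ n → ∀ pieces,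
    pvLoopB s pieces = (pieces.flatten ++ (pvLoopB s []).1, (pvLoopB s []).2) := by
  intro n
  induction n using Nat.strong_induction_on with
  | _ n ih =>
  intro s hs pieces
  by_cases hfo : PySem.Chars.find s pvOpen = -1
  · simp [pvLoopB_eq_nf hfo]
  · by_cases hfc : PySem.Chars.find (s.drop ((PySem.Chars.find s pvOpen).toNat + 4)) pvClose = -1
    · simp [pvLoopB_eq_noclose hfo hfc]
    · have hlen := pvStep_len hfo hfc
      rw [pvLoopB_eq_step hfo hfc, pvLoopB_eq_step hfo hfc ([])]
      rw [ih _ (by omega) _ le_rfl (pieces ++ [s.take (PySem.Chars.find s pvOpen).toNat]),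
          ih _ (by omega) _ le_rfl ([] ++ [s.take (PySem.Chars.find s pvOpen).toNat])]
      simp

-- unfolding equations of pvStripB
lemma pvStripB_false (s : List Char) : pvStripB s false = pvLoopB s [] := by
  simp [pvStripB]

lemma pvStripB_true_nf {s : List Char} (h : PySem.Chars.find s pvClose = -1) :
    pvStripB s true = ([], true) := by
  simp [pvStripB, pvPartition_not_found h]

lemma pvStripB_true_found {s : List Char} (h : PySem.Chars.find s pvClose ≠ -1) :
    pvStripB s true = pvLoopB (s.drop ((PySem.Chars.find s pvClose).toNat + 3)) [] := by
  have h3 : pvClose.length = 3 := by decide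
  simp [pvStripB, pvPartition_found h, h3]

-- pulling a single accumulated piece out of pvLoopB
lemma pvLoopB_acc1 (R T : List Char) :
    pvLoopB R [T] = (T ++ (pvLoopB R []).1, (pvLoopB R []).2) := by
  have h := pvLoopB_acc R.length R le_rfl [T]
  simpa using h

-- main invariant: A's loop from index i equals B run on the remaining suffix
lemma pvMain : ∀ (n : Nat) (s : List Char) (i : Nat), s.length - i ≤ n → i ≤ s.length →
    ∀ ic out, pvAuxA s i ic out =
      (out.flatten ++ (pvStripB (s.drop i) ic).1, (pvStripB (s.drop i) ic).2) := by
  intro n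
  induction n using Nat.strong_induction_on with
  | _ n ih =>
  intro s i hn hi ic out
  by_cases hlt : i < s.length
  · rw [pvAuxA.eq_def, dif_pos hlt]
    cases ic
    · -- not inside a comment: look for "<!--"
      rw [PySem.Chars.findFrom_natCast s pvOpen i hi]
      by_cases hj : PySem.Chars.find (s.drop i) pvOpen = -1
      · rw [if_neg (by decide : ¬ (false = true))]
        rw [dif_pos (by simp [hj])]
        rw [PySem.List.slice_from_natCast]
        rw [pvStripB_false, pvLoopB_eq_nf hj]
        simp
      · obtain ⟨hj0, hjb⟩ := pvFind_bound hj
        have h4 : pvOpen.length = 4 := by decide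
        rw [h4] at hjb
        simp only [List.length_drop] at hjb
        have hne : ¬ ((if PySem.Chars.find (s.drop i) pvOpen = -1 then (-1 : Int)
            else (i : Int) + PySem.Chars.find (s.drop i) pvOpen) = -1) := by
          rw [if_neg hj]; omega
        rw [if_neg (by decide : ¬ (false = true))]
        rw [dif_neg hne]
        rw [if_neg hj]
        have htn : ((i : Int) + PySem.Chars.find (s.drop i) pvOpen).toNat
            = i + (PySem.Chars.find (s.drop i) pvOpen).toNat := by omega
        rw [htn]
        -- the saved piece line[i:start] is (s.drop i).take j
        have hslice : PySem.List.slice s (some (i : Int))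
              (some ((i : Int) + PySem.Chars.find (s.drop i) pvOpen))
            = (s.drop i).take (PySem.Chars.find (s.drop i) pvOpen).toNat := by
          rw [show (i : Int) + PySem.Chars.find (s.drop i) pvOpen
              = (i : Int) + (((PySem.Chars.find (s.drop i) pvOpen).toNat : Nat) : Int) by omega]
          exact PySem.List.slice_natCast_add s i (PySem.Chars.find (s.drop i) pvOpen).toNat
        rw [hslice]
        have harg : i + (PySem.Chars.find (s.drop i) pvOpen).toNat + 4 ≤ s.length := by omega
        rw [ih (s.length - (i + (PySem.Chars.find (s.drop i) pvOpen).toNat + 4)) (by omega)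
              s _ le_rfl harg true]
        have hlist : s.drop (i + (PySem.Chars.find (s.drop i) pvOpen).toNat + 4)
            = (s.drop i).drop ((PySem.Chars.find (s.drop i) pvOpen).toNat + 4) := by
          rw [List.drop_drop, ← Nat.add_assoc]
        rw [hlist]
        by_cases hfc : PySem.Chars.find
            ((s.drop i).drop ((PySem.Chars.find (s.drop i) pvOpen).toNat + 4)) pvClose = -1
        · rw [pvStripB_true_nf hfc, pvStripB_false, pvLoopB_eq_noclose hj hfc]
          simp
        · rw [pvStripB_true_found hfc, pvStripB_false, pvLoopB_eq_step hj hfc]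
          simp [pvLoopB_acc1]
    · -- inside a comment: look for "-->"
      rw [PySem.Chars.findFrom_natCast s pvClose i hi]
      by_cases hj : PySem.Chars.find (s.drop i) pvClose = -1
      · rw [if_pos rfl, dif_pos (by simp [hj])]
        rw [pvStripB_true_nf hj]
        simp
      · obtain ⟨hj0, hjb⟩ := pvFind_bound hj
        have h3 : pvClose.length = 3 := by decide
        rw [h3] at hjb
        simp only [List.length_drop] at hjb
        have hne : ¬ ((if PySem.Chars.find (s.drop i) pvClose = -1 then (-1 : Int)
            else (i : Int) + PySem.Chars.find (s.drop i) pvClose) = -1) := by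
          rw [if_neg hj]; omega
        rw [if_pos rfl, dif_neg hne, if_neg hj]
        have htn : ((i : Int) + PySem.Chars.find (s.drop i) pvClose).toNat
            = i + (PySem.Chars.find (s.drop i) pvClose).toNat := by omega
        rw [htn]
        have harg : i + (PySem.Chars.find (s.drop i) pvClose).toNat + 3 ≤ s.length := by omega
        rw [ih (s.length - (i + (PySem.Chars.find (s.drop i) pvClose).toNat + 3)) (by omega)
              s _ le_rfl harg false]
        rw [pvStripB_true_found hj, pvStripB_false]
        have hlist : s.drop (i + (PySem.Chars.find (s.drop i) pvClose).toNat + 3)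
            = (s.drop i).drop ((PySem.Chars.find (s.drop i) pvClose).toNat + 3) := by
          rw [List.drop_drop, ← Nat.add_assoc]
        rw [hlist]
  · -- i = len(line): the loop is over
    have hdrop : s.drop i = [] := by
      have : s.length ≤ i := by omega
      simp [List.drop_eq_nil_iff.mpr this]
    rw [pvAuxA.eq_def, dif_neg hlt, hdrop]
    cases ic
    · rw [pvStripB_false, pvLoopB_eq_nf (by decide)]
      simp
    · rw [pvStripB_true_nf (by decide)]
      simp

-- ===== VERDICT (by name: the statement is the Claim_ definition above) =====
theorem strip_xml_comments_spec : Claim_equal_strip_xml_comments := by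
  intro line ic _
  unfold Spec_strip_xml_comments strip_xml_comments strip_xml_comments_alt
  have h := pvMain line.toList.length line.toList 0 (by omega) (by omega) ic []
  simp at h
  rw [h]
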